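-- pv_equiv track=rewrite | github.com/chbrandt/npt | npt/pipelines/download.py | _parseLbl
-- ===== SOURCE A (Python) =====
-- def _parseLbl(values_txt):
--     lines = values_txt.splitlines()
--     img_header = {}
--     for line in lines:
--         value = line
--         fields = [v.strip() for v in value.split("=")]
--         key_value = fields[0]
--         fill_value = fields[-1].replace('"',"").rstrip()
--         if 'DATA_SET_ID' == key_value:
--             l_datasetId = fill_value.replace("-","_").replace(".","_").split("_")
--             img_header['datasetId'] = "_".join(l_datasetId[0:3:2])
--             img_header['observationMode'] = l_datasetId[4]
--
--         elif 'PRODUCT_ID' == key_value: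
--             img_header['idFromProvider'] = fill_value
--
--         elif 'INSTRUMENT_HOST_NAME' == key_value:
--             img_header['instrumentHostName'] = fill_value
--             img_header['spacecraftId'] = "".join([s[0].upper() for s in fill_value.split()])
--
--         elif 'INSTRUMENT_NAME' == key_value:
--             img_header['instrumentName'] = fill_value
--
--         elif 'INSTRUMENT_ID' == key_value:
--             img_header['instrumentId'] = fill_value
--
--         elif 'TARGET_NAME' == key_value:
--             img_header['targetName'] = fill_value
--
--         elif 'MISSION_PHASE_NAME' == key_value:
--             img_header['missionPhaseName'] = fill_value
--
--         elif 'PRODUCT_CREATION_TIME' == key_value: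
--             img_header['productCreationTime'] = fill_value
--
--         elif 'START_TIME' == key_value:
--             img_header['startTime'] = fill_value.replace(" ", "")
--
--         elif 'STOP_TIME' == key_value:
--             img_header['stopTime'] = fill_value.replace(" ", "")
--
--
--     img_header['solarDistance'] = ""
--     img_header['solarLongitude'] = ""
--
--     _keys = list(img_header.keys())
--     _keys.sort()
--     return {k:img_header[k] for k in _keys}
-- ===== SOURCE B (Python) =====
-- def _parseLbl(values_txt):
--     # Pass 1: index the label into a raw key -> cleaned-value dict (last occurrence wins).
--     raw = {}
--     for line in values_txt.splitlines():
--         fields = [v.strip() for v in line.split("=")]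
--         raw[fields[0]] = fields[-1].replace('"', "").rstrip()
--
--     # Pass 2: declarative table of output fields, listed in sorted output-key order:
--     # (output key, source label key or None for a constant, transformation).
--     def dsid(v):
--         parts = v.replace("-", "_").replace(".", "_").split("_")
--         return "_".join(parts[0:3:2])
--
--     def obsmode(v):
--         return v.replace("-", "_").replace(".", "_").split("_")[4]
--
--     def scid(v):
--         return "".join(w[0].upper() for w in v.split())
--
--     table = [
--         ("datasetId",           "DATA_SET_ID",           dsid),
--         ("idFromProvider",      "PRODUCT_ID",            lambda v: v),
--         ("instrumentHostName",  "INSTRUMENT_HOST_NAME",  lambda v: v),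
--         ("instrumentId",        "INSTRUMENT_ID",         lambda v: v),
--         ("instrumentName",      "INSTRUMENT_NAME",       lambda v: v),
--         ("missionPhaseName",    "MISSION_PHASE_NAME",    lambda v: v),
--         ("observationMode",     "DATA_SET_ID",           obsmode),
--         ("productCreationTime", "PRODUCT_CREATION_TIME", lambda v: v),
--         ("solarDistance",       None,                    None),
--         ("solarLongitude",      None,                    None),
--         ("spacecraftId",        "INSTRUMENT_HOST_NAME",  scid),
--         ("startTime",           "START_TIME",            lambda v: v.replace(" ", "")),
--         ("stopTime",            "STOP_TIME",             lambda v: v.replace(" ", "")),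
--         ("targetName",          "TARGET_NAME",           lambda v: v),
--     ]
--     return {out_key: ("" if src is None else f(raw[src]))
--             for out_key, src, f in table
--             if src is None or src in raw}
-- ===== Notes on version B (the rewrite author's own statement) =====
-- stated objective: alternative
-- what changed: A's single pass with a 10-branch elif chain plus a final key-sort and dict rebuild is replaced by an index pass building a raw key->cleaned-value dict (last occurrence wins) followed by a declarative 14-entry output-field table applied in already-sorted output-key order, so the elif chain and the sort disappear.
import Mathlib
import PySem

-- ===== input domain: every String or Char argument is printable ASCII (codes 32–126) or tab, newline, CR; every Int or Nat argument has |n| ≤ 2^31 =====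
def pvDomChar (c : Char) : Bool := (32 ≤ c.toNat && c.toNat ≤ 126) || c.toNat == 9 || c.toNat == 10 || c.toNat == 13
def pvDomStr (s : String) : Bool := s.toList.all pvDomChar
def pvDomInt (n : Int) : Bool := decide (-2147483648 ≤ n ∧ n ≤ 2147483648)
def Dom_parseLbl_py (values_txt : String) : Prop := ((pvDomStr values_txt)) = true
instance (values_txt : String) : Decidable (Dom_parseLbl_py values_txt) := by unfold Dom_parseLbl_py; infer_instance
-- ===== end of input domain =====

-- B re-decomposes A's single-pass elif chain into an index pass (raw key->value dict) plus a
-- declarative output-field table emitted directly in sorted key order; alternative, not faster.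

-- Shared line/value cleaning helpers (both Pythons compute these exact expressions):
-- fields = [v.strip() for v in line.split("=")]  (split? is some: the separator "=" is nonempty;
-- split always yields a nonempty list, so the headD/getLastD defaults never fire)
def pvFieldsOf (line : String) : List String :=
  ((PySem.Str.split? line "=").getD []).map PySem.Str.strip
def pvKeyOf (line : String) : String := (pvFieldsOf line).headD ""          -- fields[0]
def pvFillOf (line : String) : String :=                                    -- fields[-1].replace('"',"").rstrip()
  PySem.Str.rstrip (PySem.Str.replace ((pvFieldsOf line).getLastD "") "\"" "")
-- fill_value.replace("-","_").replace(".","_").split("_")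
def pvParts (v : String) : List String :=
  (PySem.Str.split? (PySem.Str.replace (PySem.Str.replace v "-" "_") "." "_") "_").getD []
def pvDsid (v : String) : String :=                                         -- "_".join(parts[0:3:2])
  PySem.Str.join "_" ((PySem.List.slice? (pvParts v) (some 0) (some 3) 2).getD [])
def pvObsMode (v : String) : String :=                                      -- parts[4]; none = IndexError, excluded by Pre_
  (PySem.List.pyGet? (pvParts v) 4).getD ""
def pvScId (v : String) : String :=                                         -- "".join(w[0].upper() for w in v.split()); split() words are nonempty
  PySem.Str.join "" ((PySem.Str.split₀ v).map (fun w => String.ofList [PySem.Chars.upperChar (w.toList.headD ' ')]))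
def pvNoSpace (v : String) : String := PySem.Str.replace v " " ""

-- ===== PORT A =====
def pvStepA (img : PySem.Dict String String) (line : String) : PySem.Dict String String :=
  let key_value := pvKeyOf line
  let fill_value := pvFillOf line
  if "DATA_SET_ID" = key_value then
    (img.insert "datasetId" (pvDsid fill_value)).insert "observationMode" (pvObsMode fill_value)
  else if "PRODUCT_ID" = key_value then img.insert "idFromProvider" fill_value
  else if "INSTRUMENT_HOST_NAME" = key_value then
    (img.insert "instrumentHostName" fill_value).insert "spacecraftId" (pvScId fill_value)
  else if "INSTRUMENT_NAME" = key_value then img.insert "instrumentName" fill_value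
  else if "INSTRUMENT_ID" = key_value then img.insert "instrumentId" fill_value
  else if "TARGET_NAME" = key_value then img.insert "targetName" fill_value
  else if "MISSION_PHASE_NAME" = key_value then img.insert "missionPhaseName" fill_value
  else if "PRODUCT_CREATION_TIME" = key_value then img.insert "productCreationTime" fill_value
  else if "START_TIME" = key_value then img.insert "startTime" (pvNoSpace fill_value)
  else if "STOP_TIME" = key_value then img.insert "stopTime" (pvNoSpace fill_value)
  else img

def parseLbl_py (values_txt : String) : List (String × String) :=
  let lines := PySem.Str.splitlines values_txt
  let img0 := lines.foldl pvStepA PySem.Dict.empty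
  let img := (img0.insert "solarDistance" "").insert "solarLongitude" ""
  let ks := PySem.List.sorted img.keys (fun k => k)
  ks.map (fun k => (k, img.getD k ""))   -- {k: img_header[k] for k in _keys}; every k is a key, the default never fires

-- ===== PORT B =====
def pvRawStep (raw : PySem.Dict String String) (line : String) : PySem.Dict String String :=
  raw.insert (pvKeyOf line) (pvFillOf line)

-- (output key, source label key with its transformation, or none for a constant "" field),
-- listed in sorted output-key order
def pvTable : List (String × Option (String × (String → String))) :=
  [("datasetId",           some ("DATA_SET_ID", pvDsid)),
   ("idFromProvider",      some ("PRODUCT_ID", fun v => v)),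
   ("instrumentHostName",  some ("INSTRUMENT_HOST_NAME", fun v => v)),
   ("instrumentId",        some ("INSTRUMENT_ID", fun v => v)),
   ("instrumentName",      some ("INSTRUMENT_NAME", fun v => v)),
   ("missionPhaseName",    some ("MISSION_PHASE_NAME", fun v => v)),
   ("observationMode",     some ("DATA_SET_ID", pvObsMode)),
   ("productCreationTime", some ("PRODUCT_CREATION_TIME", fun v => v)),
   ("solarDistance",       none),
   ("solarLongitude",      none),
   ("spacecraftId",        some ("INSTRUMENT_HOST_NAME", pvScId)),
   ("startTime",           some ("START_TIME", pvNoSpace)),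
   ("stopTime",            some ("STOP_TIME", pvNoSpace)),
   ("targetName",          some ("TARGET_NAME", fun v => v))]

def parseLbl_py_alt (values_txt : String) : List (String × String) :=
  let raw := (PySem.Str.splitlines values_txt).foldl pvRawStep PySem.Dict.empty
  pvTable.filterMap (fun e =>
    match e.2 with
    | none => some (e.1, "")
    | some (src, f) => (raw.get? src).map (fun v => (e.1, f v)))

-- ===== PRECONDITION & SPEC =====
-- Pre_ excludes exactly the labels on which the Python A raises IndexError: a line whose first
-- '='-field is 'DATA_SET_ID' but whose cleaned value splits into fewer than 5 '_'-parts.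
def Pre_parseLbl_py (values_txt : String) : Prop :=
  ∀ line ∈ PySem.Str.splitlines values_txt,
    pvKeyOf line = "DATA_SET_ID" → 5 ≤ (pvParts (pvFillOf line)).length
instance (values_txt : String) : Decidable (Pre_parseLbl_py values_txt) := by
  unfold Pre_parseLbl_py; infer_instance

def pvWitness_parseLbl_py : String :=
  "DATA_SET_ID = \"A-B.C_D_E\"\nTARGET_NAME = MARS"

def Spec_parseLbl_py (values_txt : String) (out : List (String × String)) : Prop := out = parseLbl_py_alt values_txt
instance (values_txt : String) (out : List (String × String)) : Decidable (Spec_parseLbl_py values_txt out) := by unfold Spec_parseLbl_py; infer_instance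

-- ===== CLAIM (what is proved, stated in full; the proofs are below) =====
def Claim_equal_parseLbl_py : Prop := ∀ (values_txt : String), Dom_parseLbl_py values_txt → Pre_parseLbl_py values_txt → Spec_parseLbl_py values_txt (parseLbl_py values_txt)

-- ===== LEMMAS AND PROOFS =====

-- the 14 possible output keys, in sorted order
def pvKS : List String :=
  ["datasetId", "idFromProvider", "instrumentHostName", "instrumentId", "instrumentName",
   "missionPhaseName", "observationMode", "productCreationTime", "solarDistance",
   "solarLongitude", "spacecraftId", "startTime", "stopTime", "targetName"]

-- What A's loop dictionary knows, expressed through B's raw index (the loop invariant).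
def pvInv (img raw : PySem.Dict String String) : Prop :=
  img.get? "datasetId" = (raw.get? "DATA_SET_ID").map pvDsid ∧
  img.get? "idFromProvider" = raw.get? "PRODUCT_ID" ∧
  img.get? "instrumentHostName" = raw.get? "INSTRUMENT_HOST_NAME" ∧
  img.get? "instrumentId" = raw.get? "INSTRUMENT_ID" ∧
  img.get? "instrumentName" = raw.get? "INSTRUMENT_NAME" ∧
  img.get? "missionPhaseName" = raw.get? "MISSION_PHASE_NAME" ∧
  img.get? "observationMode" = (raw.get? "DATA_SET_ID").map pvObsMode ∧
  img.get? "productCreationTime" = raw.get? "PRODUCT_CREATION_TIME" ∧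
  img.get? "spacecraftId" = (raw.get? "INSTRUMENT_HOST_NAME").map pvScId ∧
  img.get? "startTime" = (raw.get? "START_TIME").map pvNoSpace ∧
  img.get? "stopTime" = (raw.get? "STOP_TIME").map pvNoSpace ∧
  img.get? "targetName" = raw.get? "TARGET_NAME" ∧
  ∀ k, k ∉ pvKS → img.get? k = none

-- pointwise description of the finished header (loop dict + the two solar inserts)
def pvDeriveF (raw : PySem.Dict String String) (k : String) : Option String :=
  if k = "datasetId" then (raw.get? "DATA_SET_ID").map pvDsid
  else if k = "idFromProvider" then raw.get? "PRODUCT_ID"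
  else if k = "instrumentHostName" then raw.get? "INSTRUMENT_HOST_NAME"
  else if k = "instrumentId" then raw.get? "INSTRUMENT_ID"
  else if k = "instrumentName" then raw.get? "INSTRUMENT_NAME"
  else if k = "missionPhaseName" then raw.get? "MISSION_PHASE_NAME"
  else if k = "observationMode" then (raw.get? "DATA_SET_ID").map pvObsMode
  else if k = "productCreationTime" then raw.get? "PRODUCT_CREATION_TIME"
  else if k = "solarDistance" then some ""
  else if k = "solarLongitude" then some ""
  else if k = "spacecraftId" then (raw.get? "INSTRUMENT_HOST_NAME").map pvScId
  else if k = "startTime" then (raw.get? "START_TIME").map pvNoSpace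
  else if k = "stopTime" then (raw.get? "STOP_TIME").map pvNoSpace
  else if k = "targetName" then raw.get? "TARGET_NAME"
  else none

set_option maxHeartbeats 2000000 in
theorem pvStepA_inv (line : String) (img raw : PySem.Dict String String)
    (h : pvInv img raw) : pvInv (pvStepA img line) (pvRawStep raw line) := by
  obtain ⟨c1, c2, c3, c4, c5, c6, c7, c8, c9, c10, c11, c12, cn⟩ := h
  unfold pvStepA pvRawStep
  dsimp only
  generalize pvKeyOf line = key
  generalize pvFillOf line = fill
  split_ifs with h1 h2 h3 h4 h5 h6 h7 h8 h9 h10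
  all_goals try subst h1
  all_goals try subst h2
  all_goals try subst h3
  all_goals try subst h4
  all_goals try subst h5
  all_goals try subst h6
  all_goals try subst h7
  all_goals try subst h8
  all_goals try subst h9
  all_goals try subst h10
  all_goals refine ⟨?_, ?_, ?_, ?_, ?_, ?_, ?_, ?_, ?_, ?_, ?_, ?_, ?_⟩
  all_goals try
    (intro k hk
     have h0 := cn k hk
     simp only [pvKS, List.mem_cons, List.not_mem_nil, or_false, not_or] at hk
     obtain ⟨n1, n2, n3, n4, n5, n6, n7, n8, n9, n10, n11, n12, n13, n14⟩ := hk)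
  all_goals simp_all [PySem.Dict.get?_insert]

theorem pvFoldl_inv (lines : List String) (img raw : PySem.Dict String String)
    (h : pvInv img raw) : pvInv (lines.foldl pvStepA img) (lines.foldl pvRawStep raw) := by
  induction lines generalizing img raw with
  | nil => exact h
  | cons l t ih => exact ih _ _ (pvStepA_inv l img raw h)

theorem pvInv_empty : pvInv PySem.Dict.empty PySem.Dict.empty := by
  refine ⟨?_, ?_, ?_, ?_, ?_, ?_, ?_, ?_, ?_, ?_, ?_, ?_, fun k _ => ?_⟩ <;>
    simp [PySem.Dict.get?_empty]

theorem pvFoldl_nodup (lines : List String) (img : PySem.Dict String String)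
    (h : img.keys.Nodup) : (lines.foldl pvStepA img).keys.Nodup := by
  induction lines generalizing img with
  | nil => exact h
  | cons l t ih =>
      refine ih _ ?_
      unfold pvStepA
      dsimp only
      split_ifs <;>
        first
          | exact h
          | exact PySem.Dict.nodup_keys_insert _ _ _ h
          | exact PySem.Dict.nodup_keys_insert _ _ _ (PySem.Dict.nodup_keys_insert _ _ _ h)

set_option maxHeartbeats 2000000 in
theorem pvInv_get (img raw : PySem.Dict String String) (h : pvInv img raw) :
    ∀ k, ((img.insert "solarDistance" "").insert "solarLongitude" "").get? k = pvDeriveF raw k := by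
  obtain ⟨c1, c2, c3, c4, c5, c6, c7, c8, c9, c10, c11, c12, cn⟩ := h
  intro k
  by_cases e1 : k = "datasetId";            · subst e1; simp [pvDeriveF, PySem.Dict.get?_insert, c1]
  by_cases e2 : k = "idFromProvider";       · subst e2; simp [pvDeriveF, PySem.Dict.get?_insert, c2]
  by_cases e3 : k = "instrumentHostName";   · subst e3; simp [pvDeriveF, PySem.Dict.get?_insert, c3]
  by_cases e4 : k = "instrumentId";         · subst e4; simp [pvDeriveF, PySem.Dict.get?_insert, c4]
  by_cases e5 : k = "instrumentName";       · subst e5; simp [pvDeriveF, PySem.Dict.get?_insert, c5]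
  by_cases e6 : k = "missionPhaseName";     · subst e6; simp [pvDeriveF, PySem.Dict.get?_insert, c6]
  by_cases e7 : k = "observationMode";      · subst e7; simp [pvDeriveF, PySem.Dict.get?_insert, c7]
  by_cases e8 : k = "productCreationTime";  · subst e8; simp [pvDeriveF, PySem.Dict.get?_insert, c8]
  by_cases e9 : k = "solarDistance";        · subst e9; simp [pvDeriveF, PySem.Dict.get?_insert]
  by_cases e10 : k = "solarLongitude";      · subst e10; simp [pvDeriveF]
  by_cases e11 : k = "spacecraftId";        · subst e11; simp [pvDeriveF, PySem.Dict.get?_insert, c9]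
  by_cases e12 : k = "startTime";           · subst e12; simp [pvDeriveF, PySem.Dict.get?_insert, c10]
  by_cases e13 : k = "stopTime";            · subst e13; simp [pvDeriveF, PySem.Dict.get?_insert, c11]
  by_cases e14 : k = "targetName";          · subst e14; simp [pvDeriveF, PySem.Dict.get?_insert, c12]
  have h0 : img.get? k = none := cn k (by simp [pvKS, e1, e2, e3, e4, e5, e6, e7, e8, e9, e10, e11, e12, e13, e14])
  simp [pvDeriveF, PySem.Dict.get?_insert, h0, e1, e2, e3, e4, e5, e6, e7, e8, e9, e10, e11, e12, e13, e14]

theorem pvDeriveF_mem_KS (raw : PySem.Dict String String) (k : String)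
    (h : (pvDeriveF raw k).isSome) : k ∈ pvKS := by
  by_contra hk
  simp only [pvKS, List.mem_cons, List.not_mem_nil, or_false, not_or] at hk
  obtain ⟨h1, h2, h3, h4, h5, h6, h7, h8, h9, h10, h11, h12, h13, h14⟩ := hk
  simp [pvDeriveF, h1, h2, h3, h4, h5, h6, h7, h8, h9, h10, h11, h12, h13, h14] at h

theorem pvFilter_map_eq_filterMap (h : String → Option String) (ks : List String) :
    (ks.filter (fun k => (h k).isSome)).map (fun k => (k, (h k).getD "")) =
      ks.filterMap (fun k => (h k).map (fun v => (k, v))) := by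
  induction ks with
  | nil => rfl
  | cons a t ih =>
      cases hk : h a <;> simp [hk, ih]

-- ===== VERDICT (by name: the statement is the Claim_ definition above) =====
set_option maxHeartbeats 2000000 in
theorem parseLbl_py_spec : Claim_equal_parseLbl_py := by
  intro v _ _
  unfold Spec_parseLbl_py parseLbl_py parseLbl_py_alt
  dsimp only
  set lines := PySem.Str.splitlines v with hl
  set raw := lines.foldl pvRawStep PySem.Dict.empty with hraw
  have hInv : pvInv (lines.foldl pvStepA PySem.Dict.empty) raw :=
    pvFoldl_inv lines _ _ pvInv_empty
  set img0 := lines.foldl pvStepA PySem.Dict.empty with himg0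
  set imgF := (img0.insert "solarDistance" "").insert "solarLongitude" "" with hi
  have hF : ∀ k, imgF.get? k = pvDeriveF raw k := pvInv_get img0 raw hInv
  have hnd : imgF.keys.Nodup :=
    PySem.Dict.nodup_keys_insert _ _ _
      (PySem.Dict.nodup_keys_insert _ _ _
        (pvFoldl_nodup _ _ PySem.Dict.nodup_keys_empty))
  have hKSnd : pvKS.Nodup := by decide
  have hKSlt : List.Pairwise (fun a b : String => a < b) pvKS := by
    have h' : List.Pairwise (fun a b : List Char => a < b) (pvKS.map String.toList) := by decide
    exact (List.pairwise_map.mp h').imp (fun h => String.lt_iff_toList_lt.mpr h)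
  set p : String → Bool := fun k => (pvDeriveF raw k).isSome with hp
  have hmem : ∀ k, k ∈ pvKS.filter p ↔ k ∈ imgF.keys := by
    intro k
    rw [List.mem_filter]
    constructor
    · rintro ⟨-, hs⟩
      have hne : imgF.get? k ≠ none := by
        rw [hF k]; exact Option.isSome_iff_ne_none.mp hs
      by_contra hk
      exact hne ((PySem.Dict.get?_eq_none_iff_not_mem_keys _ _).mpr hk)
    · intro hk
      have hne : imgF.get? k ≠ none := by
        intro hnone
        exact ((PySem.Dict.get?_eq_none_iff_not_mem_keys _ _).mp hnone) hk
      have hs : (pvDeriveF raw k).isSome = true := by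
        rw [← hF k]; exact Option.isSome_iff_ne_none.mpr hne
      exact ⟨pvDeriveF_mem_KS raw k hs, hs⟩
  have hperm : (pvKS.filter p).Perm imgF.keys :=
    (List.perm_ext_iff_of_nodup (hKSnd.filter p) hnd).mpr hmem
  have heq : PySem.List.sorted imgF.keys (fun k : String => k) = pvKS.filter p :=
    PySem.List.sorted_eq_of_perm_of_pairwise_lt imgF.keys (pvKS.filter p) _ hperm
      (hKSlt.filter p)
  rw [heq]
  rw [List.map_congr_left
        (g := fun k => (k, (pvDeriveF raw k).getD ""))
        (fun k _ => by rw [PySem.Dict.getD_eq_get?_getD, hF k])]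
  rw [pvFilter_map_eq_filterMap (pvDeriveF raw) pvKS]
  simp [pvKS, pvTable, List.filterMap_cons, pvDeriveF, Option.map_map, Function.comp_def]
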